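-- pv_equiv track=rewrite | github.com/baiyuqi/agentic-society-neo | asociety/personality/cfa_utils.py | _get_domain_questions
-- ===== SOURCE A (Python) =====
-- DOMAIN_TO_FACETS = {
--     "N": [1, 6, 11, 16, 21, 26], "E": [2, 7, 12, 17, 22, 27],
--     "O": [3, 8, 13, 18, 23, 28], "A": [4, 9, 14, 19, 24, 29],
--     "C": [5, 10, 15, 20, 25, 30],
-- }
--
-- def _get_domain_questions(domain, num_questions=120):
--     """
--     Gets the question numbers for a given Big Five domain.
--     This logic is replicated from InternalConsistencyPanel.
--     """
--     questions_per_facet = 4 if num_questions <= 120 else 10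
--     num_facets = 30
--     domain_q_numbers = []
--     facets = DOMAIN_TO_FACETS[domain]
--     for i in range(questions_per_facet):
--         for facet_num in facets:
--             q_num = i * num_facets + facet_num
--             domain_q_numbers.append(q_num)
--     return sorted(domain_q_numbers)
-- ===== SOURCE B (Python) =====
-- DOMAIN_TO_FACETS = {
--     "N": [1, 6, 11, 16, 21, 26], "E": [2, 7, 12, 17, 22, 27],
--     "O": [3, 8, 13, 18, 23, 28], "A": [4, 9, 14, 19, 24, 29],
--     "C": [5, 10, 15, 20, 25, 30],
-- }
--
-- def _get_domain_questions(domain, num_questions=120):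
--     # A domain's questions are exactly the numbers in 1..qpf*30 congruent
--     # to its first facet mod 5 (facets step by 5, blocks step by 30), and
--     # a contiguous ascending scan needs no sort.
--     facets = DOMAIN_TO_FACETS[domain]
--     r = facets[0] % 5
--     qpf = 4 if num_questions <= 120 else 10
--     return [q for q in range(1, qpf * 30 + 1) if q % 5 == r]
-- ===== Notes on version B (the rewrite author's own statement) =====
-- stated objective: simpler
-- what changed: Replaces the nested facet-expansion loop plus sort by a single ascending residue-filtered scan of range(1, qpf*30+1), using that a domain's questions are exactly the numbers congruent to its first facet mod 5.
import Mathlib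
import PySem

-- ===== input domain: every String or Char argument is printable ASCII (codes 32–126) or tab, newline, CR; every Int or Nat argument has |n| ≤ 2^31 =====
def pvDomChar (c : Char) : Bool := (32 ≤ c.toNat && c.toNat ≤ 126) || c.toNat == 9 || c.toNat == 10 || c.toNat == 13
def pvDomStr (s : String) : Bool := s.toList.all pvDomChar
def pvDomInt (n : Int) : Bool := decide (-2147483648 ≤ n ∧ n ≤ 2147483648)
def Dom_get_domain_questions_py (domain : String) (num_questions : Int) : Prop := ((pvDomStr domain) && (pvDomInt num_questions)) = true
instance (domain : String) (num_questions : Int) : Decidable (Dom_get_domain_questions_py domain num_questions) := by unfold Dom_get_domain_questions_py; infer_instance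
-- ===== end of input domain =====

-- B replaces A's nested facet-expansion loop plus sort by one ascending residue-filtered range scan (objective: simpler).

-- DOMAIN_TO_FACETS (module-level constant, shared by both programs)
def domainToFacets : PySem.Dict String (List Int) :=
  PySem.Dict.ofList [("N", [1, 6, 11, 16, 21, 26]), ("E", [2, 7, 12, 17, 22, 27]),
    ("O", [3, 8, 13, 18, 23, 28]), ("A", [4, 9, 14, 19, 24, 29]), ("C", [5, 10, 15, 20, 25, 30])]

-- ===== PORT A =====
-- literal transliteration: nested append loop over range(questions_per_facet) × facets, then sorted
def get_domain_questions_py (domain : String) (num_questions : Int) : List Int :=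
  let questions_per_facet : Int := if num_questions ≤ 120 then 4 else 10
  let num_facets : Int := 30
  match domainToFacets.get? domain with
  | none => []   -- KeyError in Python; excluded by Pre_
  | some facets =>
    let domain_q_numbers :=
      (PySem.List.pyRange 0 questions_per_facet 1).foldl (fun acc i =>
        facets.foldl (fun acc facet_num => acc ++ [i * num_facets + facet_num]) acc) []
    PySem.List.sorted domain_q_numbers id false

-- ===== PORT B =====
def get_domain_questions_py_alt (domain : String) (num_questions : Int) : List Int :=
  match domainToFacets.get? domain with
  | none => []   -- KeyError in Python; excluded by Pre_
  | some facets =>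
    let r := PySem.Int.mod (facets.headD 0) 5   -- facets[0]; every table entry is nonempty
    let qpf : Int := if num_questions ≤ 120 then 4 else 10
    (PySem.List.pyRange 1 (qpf * 30 + 1) 1).filter (fun q => PySem.Int.mod q 5 == r)

-- ===== PRECONDITION & SPEC =====
-- Pre_ excludes exactly the domain strings outside the five dict keys, on which both Pythons raise KeyError.
def Pre_get_domain_questions_py (domain : String) (num_questions : Int) : Prop :=
  domain = "N" ∨ domain = "E" ∨ domain = "O" ∨ domain = "A" ∨ domain = "C"
instance (domain : String) (num_questions : Int) : Decidable (Pre_get_domain_questions_py domain num_questions) := by unfold Pre_get_domain_questions_py; infer_instance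
def pvWitness_get_domain_questions_py : String × Int := ("N", 120)

def Spec_get_domain_questions_py (domain : String) (num_questions : Int) (out : List Int) : Prop := out = get_domain_questions_py_alt domain num_questions
instance (domain : String) (num_questions : Int) (out : List Int) : Decidable (Spec_get_domain_questions_py domain num_questions out) := by unfold Spec_get_domain_questions_py; infer_instance

-- ===== CLAIM (what is proved, stated in full; the proofs are below) =====
def Claim_equal_get_domain_questions_py : Prop := ∀ (domain : String) (num_questions : Int), Dom_get_domain_questions_py domain num_questions → Pre_get_domain_questions_py domain num_questions → Spec_get_domain_questions_py domain num_questions (get_domain_questions_py domain num_questions)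

-- ===== LEMMAS AND PROOFS =====
-- For a fixed domain string, num_questions only enters through the test 'num_questions <= 120';
-- after a case split both sides are closed lists, so the kernel evaluates them.

-- ===== VERDICT (by name: the statement is the Claim_ definition above) =====
theorem get_domain_questions_py_spec : Claim_equal_get_domain_questions_py := by
  intro domain num_questions _ hpre
  unfold Spec_get_domain_questions_py
  by_cases h : num_questions ≤ 120
  · rcases hpre with h1 | h1 | h1 | h1 | h1 <;> subst h1 <;>
      simp only [get_domain_questions_py, get_domain_questions_py_alt, if_pos h] <;> decide
  · rcases hpre with h1 | h1 | h1 | h1 | h1 <;> subst h1 <;>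
      simp only [get_domain_questions_py, get_domain_questions_py_alt, if_neg h] <;> decide
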